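-- pv_equiv track=rewrite | github.com/Cabrero7/Global-Integrador-Simulaci-n | generadorNumeros.py | obtener_longitud_periodo
-- ===== SOURCE A (Python) =====
-- def obtener_longitud_periodo(a, b, m, semilla, es_mixto=True):
--     vistos = {}
--     x = semilla
--     i = 0
--     while True:
--         x = (a * x + b) % m if es_mixto else (a * x) % m
--         if x in vistos:
--             return i - vistos[x]
--         vistos[x] = i
--         i += 1
-- ===== SOURCE B (Python) =====
-- def obtener_longitud_periodo(a, b, m, semilla, es_mixto=True):
--     def paso(x):
--         return (a * x + b) % m if es_mixto else (a * x) % m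
--     # Floyd cycle detection: find a point on the cycle with O(1) memory
--     lento = paso(semilla)
--     rapido = paso(paso(semilla))
--     while rapido != lento:
--         lento = paso(lento)
--         rapido = paso(paso(rapido))
--     # measure the cycle length from the meeting point
--     z = paso(lento)
--     cuenta = 1
--     while z != lento:
--         z = paso(z)
--         cuenta += 1
--     return cuenta
-- ===== Notes on version B (the rewrite author's own statement) =====
-- stated objective: alternative
-- what changed: Replaces A's dict of seen values (O(mu+lambda) memory) with Floyd's two-pointer cycle detection: slow/fast pointers advance until they meet, then the cycle length is counted from the meeting point in O(1) memory.
import Mathlib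
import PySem

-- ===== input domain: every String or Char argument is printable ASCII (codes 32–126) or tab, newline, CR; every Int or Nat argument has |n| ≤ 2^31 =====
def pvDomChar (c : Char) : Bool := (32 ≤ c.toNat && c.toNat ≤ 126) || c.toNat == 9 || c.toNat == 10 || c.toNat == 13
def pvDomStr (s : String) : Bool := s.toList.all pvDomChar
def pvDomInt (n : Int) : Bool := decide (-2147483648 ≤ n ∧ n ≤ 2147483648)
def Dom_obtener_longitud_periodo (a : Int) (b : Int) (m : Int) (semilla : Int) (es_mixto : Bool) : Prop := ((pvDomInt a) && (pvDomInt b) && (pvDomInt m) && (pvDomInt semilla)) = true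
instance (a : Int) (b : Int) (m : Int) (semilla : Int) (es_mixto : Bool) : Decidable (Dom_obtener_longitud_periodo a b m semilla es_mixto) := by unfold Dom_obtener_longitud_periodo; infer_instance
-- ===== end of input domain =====

-- B replaces A's dict of seen values by Floyd's two-pointer cycle detection (O(1) memory
-- instead of a hash map of the whole tail+cycle); same return value on every m ≠ 0.

-- ===== PORT A =====
-- while True: x = step(x); if x in vistos: return i - vistos[x]; vistos[x] = i; i += 1
-- (fuel m.natAbs+1 is a termination guard only: the first repeat occurs within it, see goA_run)
def goA (a b m : Int) (es : Bool) : Nat → PySem.Dict Int Int → Int → Int → Int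
  | 0, _, _, _ => 0
  | fuel + 1, vistos, x, i =>
    let x' := if es then PySem.Int.mod (a * x + b) m else PySem.Int.mod (a * x) m
    match vistos.get? x' with
    | some j => i - j
    | none => goA a b m es fuel (vistos.insert x' i) x' (i + 1)

def obtener_longitud_periodo (a : Int) (b : Int) (m : Int) (semilla : Int) (es_mixto : Bool) : Int :=
  goA a b m es_mixto (m.natAbs + 1) PySem.Dict.empty semilla 0

-- ===== PORT B =====
def pasoB (a b m : Int) (es : Bool) (x : Int) : Int :=
  if es then PySem.Int.mod (a * x + b) m else PySem.Int.mod (a * x) m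

-- slow/fast pointers until they meet (fuel is a termination guard; a meeting occurs within it)
def floydMeet (a b m : Int) (es : Bool) : Nat → Int → Int → Int
  | 0, lento, _ => lento
  | fuel + 1, lento, rapido =>
    if rapido = lento then lento
    else floydMeet a b m es fuel (pasoB a b m es lento) (pasoB a b m es (pasoB a b m es rapido))

-- z = paso(lento); cuenta = 1; while z != lento: z = paso(z); cuenta += 1
def floydCount (a b m : Int) (es : Bool) (lento : Int) : Nat → Int → Int → Int
  | 0, _, cuenta => cuenta
  | fuel + 1, z, cuenta =>
    if z = lento then cuenta else floydCount a b m es lento fuel (pasoB a b m es z) (cuenta + 1)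

def obtener_longitud_periodo_alt (a : Int) (b : Int) (m : Int) (semilla : Int) (es_mixto : Bool) : Int :=
  let lento := floydMeet a b m es_mixto m.natAbs (pasoB a b m es_mixto semilla)
      (pasoB a b m es_mixto (pasoB a b m es_mixto semilla))
  floydCount a b m es_mixto lento m.natAbs (pasoB a b m es_mixto lento) 1

-- ===== PRECONDITION & SPEC =====
-- Pre_ excludes exactly m = 0, where Python's '%' raises ZeroDivisionError.
def Pre_obtener_longitud_periodo (a : Int) (b : Int) (m : Int) (semilla : Int) (es_mixto : Bool) : Prop := m ≠ 0
instance (a : Int) (b : Int) (m : Int) (semilla : Int) (es_mixto : Bool) : Decidable (Pre_obtener_longitud_periodo a b m semilla es_mixto) := by unfold Pre_obtener_longitud_periodo; infer_instance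

def pvWitness_obtener_longitud_periodo : Int × Int × Int × Int × Bool := (5, 3, 16, 7, true)

def Spec_obtener_longitud_periodo (a : Int) (b : Int) (m : Int) (semilla : Int) (es_mixto : Bool) (out : Int) : Prop := out = obtener_longitud_periodo_alt a b m semilla es_mixto
instance (a : Int) (b : Int) (m : Int) (semilla : Int) (es_mixto : Bool) (out : Int) : Decidable (Spec_obtener_longitud_periodo a b m semilla es_mixto out) := by unfold Spec_obtener_longitud_periodo; infer_instance

-- ===== CLAIM (what is proved, stated in full; the proofs are below) =====
def Claim_equal_obtener_longitud_periodo : Prop := ∀ (a : Int) (b : Int) (m : Int) (semilla : Int) (es_mixto : Bool), Dom_obtener_longitud_periodo a b m semilla es_mixto → Pre_obtener_longitud_periodo a b m semilla es_mixto → Spec_obtener_longitud_periodo a b m semilla es_mixto (obtener_longitud_periodo a b m semilla es_mixto)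

-- ===== LEMMAS AND PROOFS =====

-- every step value lies in the m.natAbs residues of Python's '%'
theorem pasoB_mem_Ico (a b m : Int) (es : Bool) (hm : m ≠ 0) (x : Int) :
    pasoB a b m es x ∈ Finset.Ico (min (m + 1) 0) (max m 1) := by
  have key : ∀ y : Int, min (m + 1) 0 ≤ PySem.Int.mod y m ∧ PySem.Int.mod y m < max m 1 := by
    intro y
    rcases lt_or_gt_of_ne hm with h | h
    · have h1 := PySem.Int.mod_neg_bounds (a := y) h
      omega
    · have h1 := PySem.Int.mod_nonneg (a := y) h
      have h2 := PySem.Int.mod_lt (a := y) h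
      omega
  unfold pasoB
  rcases es with _ | _ <;> simp only [if_true, if_false, Bool.false_eq_true, Finset.mem_Ico] <;>
    first
      | exact key (a * x)
      | exact key (a * x + b)

-- a fixed iterate pushes periods forward along the orbit
theorem per_fwd (f : Int → Int) (x : Int) (d q : ℕ) (hq : f^[q] x = x) :
    f^[q] (f^[d] x) = f^[d] x := by
  rw [← Function.iterate_add_apply, add_comm, Function.iterate_add_apply, hq]

theorem per_mul (f : Int → Int) (y : Int) (p t : ℕ) (hp : f^[p] y = y) (hd : p ∣ t) :
    f^[t] y = y := by
  obtain ⟨c, rfl⟩ := hd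
  rw [Function.iterate_mul]
  exact Function.iterate_fixed hp c

-- and, for a periodic base point, pulls them back
theorem per_back (f : Int → Int) (x : Int) (d r q : ℕ) (hr : 1 ≤ r) (hrx : f^[r] x = x)
    (hq : f^[q] (f^[d] x) = f^[d] x) : f^[q] x = x := by
  have hle : d ≤ r * d := Nat.le_mul_of_pos_left d (by omega)
  have hx : f^[r * d - d] (f^[d] x) = x := by
    rw [← Function.iterate_add_apply, Nat.sub_add_cancel hle]
    exact per_mul f x r (r * d) hrx ⟨d, rfl⟩
  calc f^[q] x = f^[q] (f^[r * d - d] (f^[d] x)) := by rw [hx]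
    _ = f^[r * d - d] (f^[q] (f^[d] x)) := by
        rw [← Function.iterate_add_apply, add_comm, Function.iterate_add_apply]
    _ = f^[r * d - d] (f^[d] x) := by rw [hq]
    _ = x := hx

-- any Floyd meeting point has exactly the same positive periods as u j₀
theorem meet_period (f : Int → Int) (sem : Int) (j₀ p s : ℕ) (hp : 1 ≤ p)
    (hx : f^[p] (f^[j₀ + 1] sem) = f^[j₀ + 1] sem)
    (hminx : ∀ q, 1 ≤ q → q < p → f^[q] (f^[j₀ + 1] sem) ≠ f^[j₀ + 1] sem)
    (hs : 1 ≤ s) (hmeet : f^[s] (f^[s] sem) = f^[s] sem) :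
    f^[p] (f^[s] sem) = f^[s] sem ∧ ∀ q, 1 ≤ q → q < p → f^[q] (f^[s] sem) ≠ f^[s] sem := by
  rcases le_total s (j₀ + 1) with hle | hle
  · -- u j₀ = f^[j₀+1-s] (f^[s] sem) : the meeting point is behind; it is periodic itself
    have hxw : f^[j₀ + 1] sem = f^[j₀ + 1 - s] (f^[s] sem) := by
      rw [← Function.iterate_add_apply, Nat.sub_add_cancel hle]
    constructor
    · exact per_back f (f^[s] sem) (j₀ + 1 - s) s p hs hmeet (by rw [← hxw]; exact hx)
    · intro q hq1 hqp hqw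
      exact hminx q hq1 hqp (by rw [hxw]; exact per_fwd f (f^[s] sem) _ q hqw)
  · -- f^[s] sem = f^[s-(j₀+1)] (u j₀) : the meeting point is a forward iterate of u j₀
    have hws : f^[s] sem = f^[s - (j₀ + 1)] (f^[j₀ + 1] sem) := by
      rw [← Function.iterate_add_apply, Nat.sub_add_cancel hle]
    constructor
    · rw [hws]; exact per_fwd f _ _ p hx
    · intro q hq1 hqp hqw
      exact hminx q hq1 hqp (per_back f (f^[j₀ + 1] sem) (s - (j₀ + 1)) p q hp hx (by rw [← hws]; exact hqw))

-- the dict A has built after k iterations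
def buildD (f : Int → Int) (sem : Int) (k : ℕ) : PySem.Dict Int Int :=
  (List.range k).foldl (fun d t => d.insert (f^[t + 1] sem) (t : Int)) PySem.Dict.empty

theorem buildD_succ (f : Int → Int) (sem : Int) (k : ℕ) :
    buildD f sem (k + 1) = (buildD f sem k).insert (f^[k + 1] sem) (k : Int) := by
  simp [buildD, List.range_succ]

theorem buildD_get_none (f : Int → Int) (sem : Int) (z : Int) :
    ∀ k, (∀ t, t < k → f^[t + 1] sem ≠ z) → (buildD f sem k).get? z = none := by
  intro k
  induction k with
  | zero => intro _; simp [buildD, PySem.Dict.get?_empty]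
  | succ k ih =>
    intro hz
    rw [buildD_succ, PySem.Dict.get?_insert]
    rw [if_neg (fun h => hz k (by omega) h.symm)]
    exact ih (fun t ht => hz t (by omega))

theorem buildD_get_some (f : Int → Int) (sem : Int) :
    ∀ k t, t < k → (∀ s u, s < u → u < k → f^[s + 1] sem ≠ f^[u + 1] sem) →
      (buildD f sem k).get? (f^[t + 1] sem) = some (t : Int) := by
  intro k
  induction k with
  | zero => intro t ht; omega
  | succ k ih =>
    intro t ht hinj
    rw [buildD_succ, PySem.Dict.get?_insert]
    by_cases h : t = k
    · subst h; rw [if_pos rfl]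
    · rw [if_neg (fun hc => hinj t k (by omega) (by omega) hc)]
      exact ih t (by omega) (fun s u hsu huk => hinj s u hsu (by omega))

-- A's loop returns (i₀ - j₀ : Int) once the fuel covers the first repeat index i₀
theorem goA_run (a b m : Int) (es : Bool) (sem : Int) (i₀ j₀ : ℕ)
    (hji : j₀ < i₀)
    (heq : (pasoB a b m es)^[j₀ + 1] sem = (pasoB a b m es)^[i₀ + 1] sem)
    (hmin : ∀ r, r < i₀ → ¬ ∃ j, j < r ∧ (pasoB a b m es)^[j + 1] sem = (pasoB a b m es)^[r + 1] sem)
    (hminj : ∀ j, j < j₀ → (pasoB a b m es)^[j + 1] sem ≠ (pasoB a b m es)^[i₀ + 1] sem) :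
    ∀ fuel k, k ≤ i₀ → i₀ < k + fuel →
      goA a b m es fuel (buildD (pasoB a b m es) sem k) ((pasoB a b m es)^[k] sem) (k : Int)
        = (i₀ : Int) - (j₀ : Int) := by
  have hinj : ∀ s u, s < u → u < i₀ → (pasoB a b m es)^[s + 1] sem ≠ (pasoB a b m es)^[u + 1] sem := by
    intro s u hsu hui hc
    exact hmin u hui ⟨s, hsu, hc⟩
  intro fuel
  induction fuel with
  | zero => intro k hk hfk; omega
  | succ fuel ih =>
    intro k hk hfk
    have hstep : (if es then PySem.Int.mod (a * ((pasoB a b m es)^[k] sem) + b) m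
        else PySem.Int.mod (a * ((pasoB a b m es)^[k] sem)) m)
        = (pasoB a b m es)^[k + 1] sem := by
      rw [Function.iterate_succ_apply']; rfl
    by_cases hk0 : k = i₀
    · subst hk0
      have hget : (buildD (pasoB a b m es) sem k).get? ((pasoB a b m es)^[k + 1] sem)
          = some (j₀ : Int) := by
        rw [← heq]
        exact buildD_get_some (pasoB a b m es) sem k j₀ hji hinj
      simp only [goA, hstep, hget]
    · have hki : k < i₀ := by omega
      have hget : (buildD (pasoB a b m es) sem k).get? ((pasoB a b m es)^[k + 1] sem) = none := by
        refine buildD_get_none (pasoB a b m es) sem _ k (fun t ht hc => ?_)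
        exact hmin k hki ⟨t, ht, hc⟩
      simp only [goA, hstep, hget]
      have : ((k : Int) + 1) = ((k + 1 : ℕ) : Int) := by push_cast; ring
      rw [this, ← buildD_succ]
      exact ih (k + 1) (by omega) (by omega)

-- the slow/fast loop stops at some genuine meeting point f^[s] sem, s ≥ 1
theorem floydMeet_run (a b m : Int) (es : Bool) (sem : Int) (tstar : ℕ) (h1 : 1 ≤ tstar)
    (hm : (pasoB a b m es)^[tstar] ((pasoB a b m es)^[tstar] sem) = (pasoB a b m es)^[tstar] sem) :
    ∀ fuel t, 1 ≤ t → t ≤ tstar → tstar ≤ t + fuel →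
      ∃ s, 1 ≤ s ∧ (pasoB a b m es)^[s] ((pasoB a b m es)^[s] sem) = (pasoB a b m es)^[s] sem ∧
        floydMeet a b m es fuel ((pasoB a b m es)^[t] sem) ((pasoB a b m es)^[t + t] sem)
          = (pasoB a b m es)^[s] sem := by
  intro fuel
  induction fuel with
  | zero =>
    intro t ht1 hts hst
    have : t = tstar := by omega
    subst this
    exact ⟨t, ht1, hm, rfl⟩
  | succ fuel ih =>
    intro t ht1 hts hst
    by_cases hmeet : (pasoB a b m es)^[t + t] sem = (pasoB a b m es)^[t] sem
    · refine ⟨t, ht1, ?_, ?_⟩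
      · rw [← Function.iterate_add_apply]; exact hmeet
      · simp only [floydMeet, if_pos hmeet]
    · have htt : t < tstar := by
        rcases Nat.lt_or_ge t tstar with h | h
        · exact h
        · exfalso; apply hmeet
          have : t = tstar := by omega
          subst this
          rw [Function.iterate_add_apply]; exact hm
      obtain ⟨s, hs1, hsm, hrun⟩ := ih (t + 1) (by omega) (by omega) (by omega)
      refine ⟨s, hs1, hsm, ?_⟩
      simp only [floydMeet, if_neg hmeet]
      have e1 : pasoB a b m es ((pasoB a b m es)^[t] sem) = (pasoB a b m es)^[t + 1] sem := by
        rw [Function.iterate_succ_apply']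
      have e2 : pasoB a b m es (pasoB a b m es ((pasoB a b m es)^[t + t] sem))
          = (pasoB a b m es)^[(t + 1) + (t + 1)] sem := by
        have : (t + 1) + (t + 1) = (t + t) + 1 + 1 := by omega
        rw [this, Function.iterate_succ_apply', Function.iterate_succ_apply']
      rw [e1, e2]
      exact hrun
    
-- counting from a point w of minimal period p returns exactly p
theorem floydCount_run (a b m : Int) (es : Bool) (w : Int) (p : ℕ) (hp1 : 1 ≤ p)
    (hw : (pasoB a b m es)^[p] w = w)
    (hmin : ∀ q, 1 ≤ q → q < p → (pasoB a b m es)^[q] w ≠ w) :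
    ∀ fuel c, 1 ≤ c → c ≤ p → p ≤ c + fuel →
      floydCount a b m es w fuel ((pasoB a b m es)^[c] w) (c : Int) = (p : Int) := by
  intro fuel
  induction fuel with
  | zero =>
    intro c hc1 hcp hpc
    have : c = p := by omega
    subst this
    rfl
  | succ fuel ih =>
    intro c hc1 hcp hpc
    by_cases hz : (pasoB a b m es)^[c] w = w
    · have : c = p := by
        by_contra hne
        exact hmin c hc1 (by omega) hz
      subst this
      simp only [floydCount, if_pos hz]
    · have hcp' : c < p := by
        rcases Nat.lt_or_ge c p with h | h
        · exact h
        · exfalso; apply hz; have : c = p := by omega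
          subst this; exact hw
      simp only [floydCount, if_neg hz]
      have e1 : pasoB a b m es ((pasoB a b m es)^[c] w) = (pasoB a b m es)^[c + 1] w := by
        rw [Function.iterate_succ_apply']
      have e2 : ((c : Int) + 1) = ((c + 1 : ℕ) : Int) := by push_cast; ring
      rw [e1, e2]
      exact ih (c + 1) (by omega) (by omega) (by omega)

-- ===== VERDICT (by name: the statement is the Claim_ definition above) =====
theorem obtener_longitud_periodo_spec : Claim_equal_obtener_longitud_periodo := by
  intro a b m semilla es _hdom hm
  replace hm : m ≠ 0 := hm
  unfold Spec_obtener_longitud_periodo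
  -- pigeonhole: a repeat among (pasoB)^[1..m.natAbs+1] semilla
  have hpig : ∃ i, i ≤ m.natAbs ∧ ∃ j, j < i ∧
      (pasoB a b m es)^[j + 1] semilla = (pasoB a b m es)^[i + 1] semilla := by
    have hmaps : ∀ t ∈ Finset.range (m.natAbs + 1),
        (pasoB a b m es)^[t + 1] semilla ∈ Finset.Ico (min (m + 1) 0) (max m 1) := by
      intro t _
      rw [Function.iterate_succ_apply']
      exact pasoB_mem_Ico a b m es hm _
    have hcard : (Finset.Ico (min (m + 1) 0) (max m 1)).card < (Finset.range (m.natAbs + 1)).card := by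
      rw [Int.card_Ico, Finset.card_range]
      omega
    obtain ⟨x, hx, y, hy, hxy, hfeq⟩ :=
      Finset.exists_ne_map_eq_of_card_lt_of_maps_to hcard hmaps
    simp only [Finset.mem_range] at hx hy
    rcases Nat.lt_or_ge x y with h | h
    · exact ⟨y, by omega, x, h, hfeq⟩
    · exact ⟨x, by omega, y, by omega, hfeq.symm⟩
  -- first repeat index i₀ and its earliest partner j₀
  have hP : ∃ i, ∃ j, j < i ∧
      (pasoB a b m es)^[j + 1] semilla = (pasoB a b m es)^[i + 1] semilla := by
    obtain ⟨i, _, hi⟩ := hpig; exact ⟨i, hi⟩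
  classical
  obtain ⟨i₀, hi₀spec, hi₀min⟩ :
      ∃ i₀, (∃ j, j < i₀ ∧ (pasoB a b m es)^[j + 1] semilla = (pasoB a b m es)^[i₀ + 1] semilla) ∧
        ∀ r, r < i₀ → ¬ ∃ j, j < r ∧
          (pasoB a b m es)^[j + 1] semilla = (pasoB a b m es)^[r + 1] semilla :=
    ⟨Nat.find hP, Nat.find_spec hP, fun r hr => Nat.find_min hP hr⟩
  obtain ⟨j₀, hji, heq, hminj⟩ :
      ∃ j₀, j₀ < i₀ ∧ (pasoB a b m es)^[j₀ + 1] semilla = (pasoB a b m es)^[i₀ + 1] semilla ∧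
        ∀ j, j < j₀ → (pasoB a b m es)^[j + 1] semilla ≠ (pasoB a b m es)^[i₀ + 1] semilla := by
    refine ⟨Nat.find hi₀spec, (Nat.find_spec hi₀spec).1, (Nat.find_spec hi₀spec).2, ?_⟩
    intro j' hj' hc
    exact Nat.find_min hi₀spec hj' ⟨lt_trans hj' (Nat.find_spec hi₀spec).1, hc⟩
  have hbound : i₀ ≤ m.natAbs := by
    obtain ⟨i, hi, j, hj, hrep⟩ := hpig
    by_contra hgt
    exact hi₀min i (by omega) ⟨j, hj, hrep⟩
  set p := i₀ - j₀ with hpdef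
  have hp1 : 1 ≤ p := by omega
  have hpp : p ≤ m.natAbs := by omega
  -- the point (pasoB)^[j₀+1] semilla has minimal positive period p
  have hpx : (pasoB a b m es)^[p] ((pasoB a b m es)^[j₀ + 1] semilla)
      = (pasoB a b m es)^[j₀ + 1] semilla := by
    rw [← Function.iterate_add_apply]
    have : p + (j₀ + 1) = i₀ + 1 := by omega
    rw [this, ← heq]
  have hminx : ∀ q, 1 ≤ q → q < p →
      (pasoB a b m es)^[q] ((pasoB a b m es)^[j₀ + 1] semilla)
        ≠ (pasoB a b m es)^[j₀ + 1] semilla := by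
    intro q hq1 hqp hc
    rw [← Function.iterate_add_apply] at hc
    have hlt : j₀ + q < i₀ := by omega
    have he : q + (j₀ + 1) = (j₀ + q) + 1 := by omega
    rw [he] at hc
    exact hi₀min (j₀ + q) hlt ⟨j₀, by omega, hc.symm⟩
  -- A's side
  have hA : obtener_longitud_periodo a b m semilla es = (i₀ : Int) - (j₀ : Int) := by
    have := goA_run a b m es semilla i₀ j₀ hji heq hi₀min hminj (m.natAbs + 1) 0
      (by omega) (by omega)
    simpa [obtener_longitud_periodo, buildD] using this
  -- B's side: a meeting exists within m.natAbs steps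
  have hmeetex : ∃ tstar, 1 ≤ tstar ∧ tstar ≤ m.natAbs ∧
      (pasoB a b m es)^[tstar] ((pasoB a b m es)^[tstar] semilla)
        = (pasoB a b m es)^[tstar] semilla := by
    refine ⟨p * (j₀ / p + 1), ?_, ?_, ?_⟩
    · calc 1 ≤ p := hp1
        _ ≤ p * (j₀ / p + 1) := Nat.le_mul_of_pos_right p (Nat.succ_pos _)
    · have h1 : (j₀ / p) * p ≤ j₀ := Nat.div_mul_le_self j₀ p
      have h2 : p * (j₀ / p + 1) = (j₀ / p) * p + p := by ring
      omega
    · have hge : j₀ + 1 ≤ p * (j₀ / p + 1) := by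
        have h2 : j₀ < p * (j₀ / p + 1) := Nat.lt_mul_div_succ j₀ (by omega)
        omega
      have hsplit : (pasoB a b m es)^[p * (j₀ / p + 1)] semilla
          = (pasoB a b m es)^[p * (j₀ / p + 1) - (j₀ + 1)] ((pasoB a b m es)^[j₀ + 1] semilla) := by
        rw [← Function.iterate_add_apply, Nat.sub_add_cancel hge]
      rw [hsplit]
      have hper := per_fwd (pasoB a b m es) ((pasoB a b m es)^[j₀ + 1] semilla)
        (p * (j₀ / p + 1) - (j₀ + 1)) p hpx
      exact per_mul (pasoB a b m es) _ p _ hper ⟨j₀ / p + 1, rfl⟩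
  obtain ⟨tstar, ht1, htm, hmeett⟩ := hmeetex
  obtain ⟨s, hs1, hsmeet, hrun⟩ := floydMeet_run a b m es semilla tstar ht1 hmeett
    m.natAbs 1 le_rfl ht1 (by omega)
  -- the meeting point has the same minimal period p
  obtain ⟨hwp, hwmin⟩ := meet_period (pasoB a b m es) semilla j₀ p s hp1 hpx hminx hs1 hsmeet
  have hcount := floydCount_run a b m es ((pasoB a b m es)^[s] semilla) p hp1 hwp hwmin
    m.natAbs 1 le_rfl hp1 (by omega)
  -- assemble B's program
  have e1 : (pasoB a b m es)^[1] semilla = pasoB a b m es semilla := Function.iterate_one _ ▸ rfl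
  have e2 : (pasoB a b m es)^[1 + 1] semilla = pasoB a b m es (pasoB a b m es semilla) := by
    rw [Function.iterate_succ_apply', e1]
  have e3 : (pasoB a b m es)^[1] ((pasoB a b m es)^[s] semilla)
      = pasoB a b m es ((pasoB a b m es)^[s] semilla) := Function.iterate_one _ ▸ rfl
  rw [e1, e2] at hrun
  rw [e3] at hcount
  have hB : obtener_longitud_periodo_alt a b m semilla es = (p : Int) := by
    show floydCount a b m es
        (floydMeet a b m es m.natAbs (pasoB a b m es semilla)
          (pasoB a b m es (pasoB a b m es semilla)))
        m.natAbs
        (pasoB a b m es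
          (floydMeet a b m es m.natAbs (pasoB a b m es semilla)
            (pasoB a b m es (pasoB a b m es semilla)))) 1 = (p : Int)
    rw [hrun]
    exact_mod_cast hcount
  rw [hA, hB]
  omega
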